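-- pv_equiv track=rewrite | github.com/lounaerys/basic_exercises | for_dict_challenges_bonus.py | most_popular_thread
-- ===== SOURCE A (Python) =====
-- def most_popular_thread(messages):
--     thread = {}
--     for message in messages:
--         users_reply = message['reply_for']
--         if users_reply is not None:
--             if users_reply in thread:
--                 thread[users_reply] += 1
--             else:
--                 thread[users_reply] = 1
--
--     if not thread:
--         return None
--
--     return max(thread, key=thread.get)
-- ===== SOURCE B (Python) =====
-- def most_popular_thread(messages):
--     targets = [m['reply_for'] for m in messages if m['reply_for'] is not None]
--     best = None
--     best_count = 0
--     rest = targets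
--     while rest:
--         x = rest[0]
--         c = rest.count(x)
--         if c > best_count:
--             best, best_count = x, c
--         rest = [y for y in rest if y != x]
--     return best
-- ===== Notes on version B (the rewrite author's own statement) =====
-- stated objective: alternative
-- what changed: Replaces A's one-pass counter-dict plus max-over-keys with repeated selection by removal: a while loop that takes the first remaining target, counts it in the shrinking list, updates a running best only on a strictly greater count, and then deletes all occurrences of that target; strict comparison over first-occurrence order reproduces Python max's first-maximal tie-breaking.
import Mathlib
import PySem

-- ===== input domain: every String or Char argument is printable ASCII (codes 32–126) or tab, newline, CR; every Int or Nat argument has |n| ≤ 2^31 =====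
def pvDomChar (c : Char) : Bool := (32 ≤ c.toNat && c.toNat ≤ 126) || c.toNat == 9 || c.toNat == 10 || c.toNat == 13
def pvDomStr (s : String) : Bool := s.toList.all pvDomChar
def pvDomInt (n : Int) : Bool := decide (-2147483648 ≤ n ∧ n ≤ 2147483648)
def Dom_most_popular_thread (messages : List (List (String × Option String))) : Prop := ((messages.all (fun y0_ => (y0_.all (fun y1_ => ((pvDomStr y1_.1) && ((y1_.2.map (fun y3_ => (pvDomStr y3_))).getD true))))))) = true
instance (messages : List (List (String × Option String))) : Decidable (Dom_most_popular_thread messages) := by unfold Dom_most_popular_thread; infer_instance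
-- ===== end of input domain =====

-- B replaces A's counter-dict + max-over-keys by repeated selection with removal: a while
-- loop that peels off one distinct target per iteration, counts it in the shrinking list,
-- and keeps a running best (alternative algorithm, not faster); equal return values proved.

-- ===== PORT A =====
-- message['reply_for'] : first-match lookup on the association list (KeyError → none, excluded by Pre_)
def pvReplyFor (m : List (String × Option String)) : Option (Option String) :=
  m.lookup "reply_for"

-- the body of A's counting loop
def pvCountStep (d : PySem.Dict String Int) (m : List (String × Option String)) : PySem.Dict String Int :=
  match pvReplyFor m with
  | some (some u) => if d.contains u then d.insert u (d.getD u 0 + 1) else d.insert u 1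
  | _ => d

def most_popular_thread (messages : List (List (String × Option String))) : Option String :=
  -- thread = {}; for message in messages: … counting loop
  let thread : PySem.Dict String Int := messages.foldl pvCountStep PySem.Dict.empty
  -- if not thread: return None
  if thread.items.isEmpty then none
  -- max(thread, key=thread.get): first key with maximal count
  else PySem.List.max? thread.keys (fun k => thread.getD k 0)

-- ===== PORT B =====
-- the comprehension's element: Some target, or none when reply_for is None
def pvTarget (m : List (String × Option String)) : Option String :=
  match pvReplyFor m with
  | some (some u) => some u
  | _ => none

-- B's while loop: x = rest[0]; c = rest.count(x); update best; rest = [y for y in rest if y != x]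
def pvLoop (rest : List String) (best : Option String) (bestCount : Int) : Option String :=
  match rest with
  | [] => best
  | x :: t =>
    let c : Int := (PySem.List.count (x :: t) x : Int)
    let s : Option String × Int := if bestCount < c then (some x, c) else (best, bestCount)
    pvLoop ((x :: t).filter (fun y => !(y == x))) s.1 s.2
termination_by rest.length
decreasing_by
  simp only [List.filter]
  simp only [BEq.rfl, Bool.not_true]
  exact Nat.lt_succ_of_le (List.length_filter_le _ _)

def most_popular_thread_alt (messages : List (List (String × Option String))) : Option String :=
  -- targets = [m['reply_for'] for m in messages if m['reply_for'] is not None]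
  let targets : List String := messages.filterMap pvTarget
  -- best = None; best_count = 0; while rest: …; return best
  pvLoop targets none 0

-- ===== PRECONDITION & SPEC =====
-- Pre_ excludes exactly the inputs where a message lacks the key 'reply_for',
-- on which the Python A (and the Python B alike) raises KeyError.
def Pre_most_popular_thread (messages : List (List (String × Option String))) : Prop :=
  ∀ m ∈ messages, (m.lookup "reply_for").isSome
instance (messages : List (List (String × Option String))) : Decidable (Pre_most_popular_thread messages) := by unfold Pre_most_popular_thread; infer_instance

def pvWitness_most_popular_thread : (List (List (String × Option String))) :=
  [[("reply_for", some "a")], [("reply_for", none)], [("reply_for", some "a")]]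

def Spec_most_popular_thread (messages : List (List (String × Option String))) (out : Option String) : Prop := out = most_popular_thread_alt messages
instance (messages : List (List (String × Option String))) (out : Option String) : Decidable (Spec_most_popular_thread messages out) := by unfold Spec_most_popular_thread; infer_instance

-- ===== CLAIM (what is proved, stated in full; the proofs are below) =====
def Claim_equal_most_popular_thread : Prop := ∀ (messages : List (List (String × Option String))), Dom_most_popular_thread messages → Pre_most_popular_thread messages → Spec_most_popular_thread messages (most_popular_thread messages)

-- ===== LEMMAS AND PROOFS =====

-- a fold that skips `none` elements is a fold over the filterMap
theorem foldl_match_eq_foldl_filterMap {α β γ : Type} (g : α → Option γ) (h : β → γ → β)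
    (l : List α) (init : β) :
    l.foldl (fun acc x => match g x with | some u => h acc u | none => acc) init
      = (l.filterMap g).foldl h init := by
  induction l generalizing init with
  | nil => rfl
  | cons x t ih =>
    simp only [List.foldl_cons, List.filterMap_cons]
    cases g x <;> simp [ih]

-- the step function of PySem.List.max?
def pvMaxStep {α : Type} (key : α → Int) (acc : Option α) (x : α) : Option α :=
  match acc with
  | none => some x
  | some m => if key m < key x then some x else some m

theorem max?_eq_foldl {α : Type} (key : α → Int) (xs : List α) :
    PySem.List.max? xs key = xs.foldl (pvMaxStep key) none := by
  rfl

-- the fresh elements Set.ofList-style dedup appends, given already-seen s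
def pvFresh {α : Type} [BEq α] (s : List α) : List α → List α
  | [] => []
  | x :: t => if s.contains x then pvFresh s t else x :: pvFresh (s ++ [x]) t

theorem foldl_add_eq_append_fresh {α : Type} [BEq α] (l s : List α) :
    l.foldl PySem.Set.add s = s ++ pvFresh s l := by
  induction l generalizing s with
  | nil => simp [pvFresh]
  | cons x t ih =>
    simp only [List.foldl_cons, pvFresh, PySem.Set.add]
    by_cases h : s.contains x
    · simp [h, ih]
    · simp [h, ih (s ++ [x])]

theorem ofList_eq_fresh {α : Type} [BEq α] (l : List α) :
    PySem.Set.ofList l = pvFresh [] l := by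
  show l.foldl PySem.Set.add [] = _
  simpa using foldl_add_eq_append_fresh l []

-- folding max? over the dedup of l equals folding it over l, provided every
-- already-seen element's key is dominated by the accumulator
theorem foldl_maxStep_fresh {α : Type} [BEq α] [LawfulBEq α] (key : α → Int)
    (l : List α) : ∀ (s : List α) (acc : Option α),
    (acc = none → s = []) →
    (∀ m, acc = some m → ∀ y ∈ s, key y ≤ key m) →
    (pvFresh s l).foldl (pvMaxStep key) acc = l.foldl (pvMaxStep key) acc := by
  induction l with
  | nil => intro s acc _ _; rfl
  | cons x t ih =>
    intro s acc hnone hdom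
    simp only [pvFresh]
    by_cases hx : s.contains x
    · -- duplicate: A's step leaves the accumulator unchanged
      cases acc with
      | none =>
        have hs := hnone rfl
        subst hs
        simp at hx
      | some m =>
        have hxm : key x ≤ key m := hdom m rfl x (by simpa using hx)
        have hstep : pvMaxStep key (some m) x = some m := by
          simp [pvMaxStep, not_lt.mpr hxm]
        simp only [hx, if_true, List.foldl_cons, hstep]
        exact ih s (some m) (by simp) (by intro m' hm'; cases hm'; exact hdom m rfl)
    · -- fresh element: both sides take the same step
      simp only [hx, List.foldl_cons]
      apply ih (s ++ [x]) (pvMaxStep key acc x)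
      · intro h; cases acc with
        | none => simp [pvMaxStep] at h
        | some m => simp [pvMaxStep] at h; split at h <;> simp_all
      · intro m' hm' y hy
        cases acc with
        | none =>
          have hs := hnone rfl
          subst hs
          simp only [pvMaxStep] at hm'
          injection hm' with h1
          subst h1
          have : y = x := by simpa using hy
          subst this
          exact le_refl _
        | some m =>
          simp only [pvMaxStep] at hm'
          rcases List.mem_append.mp hy with hys | hyx
          · have h1 : key y ≤ key m := hdom m rfl y hys
            split at hm' <;> rename_i hlt <;> cases hm'
            · exact le_of_lt (lt_of_le_of_lt h1 hlt)
            · exact h1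
          · have hyx' : y = x := by simpa using hyx
            subst hyx'
            split at hm' <;> rename_i hlt <;> cases hm'
            · exact le_refl _
            · exact not_lt.mp hlt

-- max? over the first-occurrence dedup equals max? over the full list
theorem max?_ofList_eq {α : Type} [BEq α] [LawfulBEq α] (key : α → Int) (l : List α) :
    PySem.List.max? (PySem.Set.ofList l) key = PySem.List.max? l key := by
  rw [max?_eq_foldl, max?_eq_foldl, ofList_eq_fresh]
  exact foldl_maxStep_fresh key l [] none (fun _ => rfl) (by simp)

theorem ofList_eq_nil_iff {α : Type} [BEq α] [LawfulBEq α] (l : List α) :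
    PySem.Set.ofList l = [] ↔ l = [] := by
  constructor
  · intro h
    cases l with
    | nil => rfl
    | cons x t =>
      have : x ∈ PySem.Set.ofList (x :: t) := (PySem.Set.mem_ofList _ _).mpr (by simp)
      rw [h] at this; cases this
  · intro h; subst h; rfl

-- A's result is the first target with maximal count in the target list
theorem portA_eq_max? (messages : List (List (String × Option String))) :
    most_popular_thread messages
      = PySem.List.max? (messages.filterMap pvTarget)
          (fun t => ((messages.filterMap pvTarget).count t : Int)) := by
  unfold most_popular_thread
  set ts : List String := messages.filterMap pvTarget with hts
  have hfold :
      messages.foldl pvCountStep PySem.Dict.empty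
      = ts.foldl (fun d u => if d.contains u then d.insert u (d.getD u 0 + 1) else d.insert u 1)
          PySem.Dict.empty := by
    rw [hts, ← foldl_match_eq_foldl_filterMap pvTarget
      (fun (d : PySem.Dict String Int) u => if d.contains u then d.insert u (d.getD u 0 + 1) else d.insert u 1)]
    apply PySem.List.foldl_congr_mem
    intro d m _
    unfold pvCountStep pvTarget
    rcases h : pvReplyFor m with _ | o
    · rfl
    · cases o <;> rfl
  have hstep : ts.foldl (fun (d : PySem.Dict String Int) u => if d.contains u then d.insert u (d.getD u 0 + 1) else d.insert u 1)
      PySem.Dict.empty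
      = ts.foldl (fun (d : PySem.Dict String Int) u => d.insert u (d.getD u 0 + 1)) PySem.Dict.empty := by
    apply PySem.List.foldl_congr_mem
    intro d u _
    by_cases h : d.contains u
    · simp [h]
    · rw [PySem.Dict.getD_of_not_contains d (k := u) 0 (by simpa using h)]
      simp [h]
  simp only [hfold]
  rw [hstep]
  set thread : PySem.Dict String Int := ts.foldl (fun d u => d.insert u (d.getD u 0 + 1))
    PySem.Dict.empty with hthread
  have hkeys : thread.keys = PySem.Set.ofList ts := by
    rw [hthread, PySem.Dict.keys_foldl_insert]
    simpa using PySem.Set.update_nil_left ts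
  have hgetD : ∀ v, thread.getD v 0 = (ts.count v : Int) := by
    intro v
    rw [hthread, PySem.Dict.getD_foldl_insert_add_one]
    simp [PySem.Dict.getD_empty]
  have hitems : thread.items.isEmpty = ts.isEmpty := by
    have hk : thread.items.map Prod.fst = PySem.Set.ofList ts := hkeys
    cases hts' : ts with
    | nil =>
      rw [hts'] at hk
      have hk2 : thread.items.map Prod.fst = [] := by simpa [PySem.Set.ofList] using hk
      have : thread.items = [] := List.map_eq_nil_iff.mp hk2
      simp [this]
    | cons x t =>
      have hne : PySem.Set.ofList ts ≠ [] := by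
        rw [Ne, ofList_eq_nil_iff]; simp [hts']
      have hne2 : thread.items ≠ [] := by
        intro h; apply hne; rw [← hk, h]; rfl
      simp [hne2]
  rw [hitems]
  cases hts' : ts.isEmpty with
  | true =>
    have : ts = [] := by simpa using hts'
    simp [this, PySem.List.max?]
  | false =>
    simp only [Bool.false_eq_true, if_false]
    rw [hkeys]
    have : (fun k => thread.getD k 0) = (fun t => ((PySem.List.count ts t : Nat) : Int)) := by
      funext v; rw [hgetD]; rfl
    rw [this]
    have := max?_ofList_eq (fun t => ((PySem.List.count ts t : Nat) : Int)) ts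
    rw [this]
    rfl

-- B-side: the step of the (best, best_count) pair fold
def pvStep (f : String → Int) (s : Option String × Int) (y : String) : Option String × Int :=
  if s.2 < f y then (some y, f y) else s

theorem foldl_step_congr (f g : String → Int) (l : List String) :
    ∀ (s : Option String × Int), (∀ y ∈ l, f y = g y) →
    l.foldl (pvStep f) s = l.foldl (pvStep g) s := by
  induction l with
  | nil => intro s _; rfl
  | cons y t ih =>
    intro s h
    simp only [List.foldl_cons]
    have hy : f y = g y := h y (by simp)
    have : pvStep f s y = pvStep g s y := by simp [pvStep, hy]
    rw [this]
    exact ih _ (fun z hz => h z (by simp [hz]))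

-- removing all occurrences of x is a no-op for the pair fold once f x ≤ best_count
theorem foldl_step_filter (f : String → Int) (x : String) (l : List String) :
    ∀ (s : Option String × Int), f x ≤ s.2 →
    (l.filter (fun y => !(y == x))).foldl (pvStep f) s = l.foldl (pvStep f) s := by
  induction l with
  | nil => intro s _; rfl
  | cons y t ih =>
    intro s hle
    by_cases hy : y = x
    · subst hy
      simp only [List.filter_cons, BEq.rfl, Bool.not_true, List.foldl_cons]
      have : pvStep f s y = s := by simp [pvStep, not_lt.mpr hle]
      rw [this]
      exact ih s hle
    · have hby : (y == x) = false := by simpa using hy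
      simp only [List.filter_cons, hby, Bool.not_false, List.foldl_cons]
      apply ih
      unfold pvStep
      split
      · simpa using le_of_lt (lt_of_le_of_lt hle (by assumption))
      · exact hle

theorem count_filter_ne (x y : String) (l : List String) (h : ¬ y = x) :
    (l.filter (fun z => !(z == x))).count y = l.count y := by
  induction l with
  | nil => rfl
  | cons z t ih =>
    simp only [List.filter_cons]
    by_cases hz : z = x
    · subst hz
      simp only [BEq.rfl, Bool.not_true, Bool.false_eq_true, if_false]
      rw [ih, List.count_cons]
      have hzy : ¬ (z = y) := fun e => h e.symm
      simp [hzy]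
    · have hbz : (z == x) = false := by simpa using hz
      simp only [hbz, Bool.not_false, if_true, List.count_cons, ih]

-- the while loop computes the pair fold over its own list, keyed by counts in that list
theorem pvLoop_eq_foldl_aux (n : Nat) :
    ∀ (rest : List String), rest.length ≤ n → ∀ (best : Option String) (bc : Int),
    pvLoop rest best bc
      = (rest.foldl (pvStep (fun y => ((rest.count y : Nat) : Int))) (best, bc)).1 := by
  induction n with
  | zero =>
    intro rest hlen best bc
    have : rest = [] := List.eq_nil_of_length_eq_zero (Nat.le_zero.mp hlen)
    subst this
    rw [pvLoop]
    rfl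
  | succ n ih =>
    intro rest hlen best bc
    cases rest with
    | nil =>
      rw [pvLoop]
      rfl
    | cons x t =>
      rw [pvLoop]
      set f : String → Int := fun y => (((x :: t).count y : Nat) : Int) with hf
      set c : Int := (PySem.List.count (x :: t) x : Int) with hc
      set s : Option String × Int := if bc < c then (some x, c) else (best, bc) with hs
      set rem : List String := (x :: t).filter (fun y => !(y == x)) with hrem
      have hcf : c = f x := by rw [hc, hf]; simp [PySem.List.count]
      -- counts in the remaining list agree with counts in the full list on its members
      have hcong : ∀ y ∈ rem, ((rem.count y : Nat) : Int) = f y := by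
        intro y hy
        have hyne : ¬ y = x := by
          rcases List.mem_filter.mp (hrem ▸ hy) with ⟨_, hb⟩
          intro he; subst he; simp at hb
        rw [hrem, count_filter_ne x y _ hyne, hf]
      have hlenrem : rem.length ≤ n := by
        have : rem.length < (x :: t).length := by
          rw [hrem]
          simp only [List.filter_cons, BEq.rfl, Bool.not_true, Bool.false_eq_true, if_false]
          exact Nat.lt_succ_of_le (List.length_filter_le _ _)
        omega
      rw [ih rem hlenrem s.1 s.2]
      have h1 : rem.foldl (pvStep (fun y => ((rem.count y : Nat) : Int))) (s.1, s.2)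
          = rem.foldl (pvStep f) (s.1, s.2) := by
        apply foldl_step_congr
        intro y hy; exact hcong y hy
      rw [h1]
      have hsle : f x ≤ s.2 := by
        rw [hs]
        split
        · simp [hcf]
        · simp only []
          rw [← hcf]
          omega
      have h2 : rem.foldl (pvStep f) (s.1, s.2) = t.foldl (pvStep f) (s.1, s.2) := by
        rw [hrem]
        simp only [List.filter_cons, BEq.rfl, Bool.not_true, Bool.false_eq_true, if_false]
        exact foldl_step_filter f x t (s.1, s.2) hsle
      rw [h2]
      have h3 : (x :: t).foldl (pvStep f) (best, bc) = t.foldl (pvStep f) (s.1, s.2) := by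
        have hstep : pvStep f (best, bc) x = (s.1, s.2) := by
          rw [hs]
          unfold pvStep
          rw [← hcf]
        simp only [List.foldl_cons, hstep]
      rw [h3]

-- when every key is positive, the pair fold from (none, 0) is max?'s fold from none
theorem foldl_step_eq_maxStep (f : String → Int) :
    ∀ (l : List String) (b : Option String) (bc : Int),
    ((b = none ∧ bc = 0) ∨ (∃ m, b = some m ∧ bc = f m)) →
    (∀ y ∈ l, 0 < f y) →
    (l.foldl (pvStep f) (b, bc)).1 = l.foldl (pvMaxStep f) b := by
  intro l
  induction l with
  | nil =>
    intro b bc _ _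
    rfl
  | cons y t ih =>
    intro b bc hinv hpos
    simp only [List.foldl_cons]
    have hy : 0 < f y := hpos y (by simp)
    rcases hinv with ⟨hb, hbc⟩ | ⟨m, hb, hbc⟩
    · subst hb; subst hbc
      have hstep : pvStep f (none, 0) y = (some y, f y) := by simp [pvStep, hy]
      have hmax : pvMaxStep f none y = some y := rfl
      rw [hstep, hmax]
      exact ih (some y) (f y) (Or.inr ⟨y, rfl, rfl⟩) (fun z hz => hpos z (by simp [hz]))
    · subst hb; subst hbc
      by_cases hlt : f m < f y
      · have hstep : pvStep f (some m, f m) y = (some y, f y) := by simp [pvStep, hlt]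
        have hmax : pvMaxStep f (some m) y = some y := by simp [pvMaxStep, hlt]
        rw [hstep, hmax]
        exact ih (some y) (f y) (Or.inr ⟨y, rfl, rfl⟩) (fun z hz => hpos z (by simp [hz]))
      · have hstep : pvStep f (some m, f m) y = (some m, f m) := by simp [pvStep, hlt]
        have hmax : pvMaxStep f (some m) y = some m := by simp [pvMaxStep, hlt]
        rw [hstep, hmax]
        exact ih (some m) (f m) (Or.inr ⟨m, rfl, rfl⟩) (fun z hz => hpos z (by simp [hz]))

-- B's result is also the first target with maximal count
theorem portB_eq_max? (messages : List (List (String × Option String))) :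
    most_popular_thread_alt messages
      = PySem.List.max? (messages.filterMap pvTarget)
          (fun t => ((messages.filterMap pvTarget).count t : Int)) := by
  unfold most_popular_thread_alt
  set ts : List String := messages.filterMap pvTarget with hts
  have h1 := pvLoop_eq_foldl_aux ts.length ts (le_refl _) none 0
  rw [h1, max?_eq_foldl]
  exact foldl_step_eq_maxStep _ ts none 0 (Or.inl ⟨rfl, rfl⟩)
    (fun y hy => by exact_mod_cast List.count_pos_iff.mpr hy)

-- ===== VERDICT (by name: the statement is the Claim_ definition above) =====
theorem most_popular_thread_spec : Claim_equal_most_popular_thread := by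
  intro messages _ _
  unfold Spec_most_popular_thread
  rw [portA_eq_max?, portB_eq_max?]
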